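-- pv_equiv track=rewrite | github.com/cybdmd/algorithms-with-data-structures | Lesson_1/find_comb.py | square_comb
-- ===== SOURCE A (Python) =====
-- def square_comb(faces):
--     _count = 0
--     for i in range(1, faces + 1):
--         for j in range(1, faces + 1):
--             for k in range(1, faces + 1):
--                 for l in range(1, faces + 1):
--                     _count += 1
--     return _count
-- ===== SOURCE B (Python) =====
-- def square_comb(faces):
--     # closed form: the four nested ranges each have max(faces, 0) iterations
--     n = faces if faces > 0 else 0
--     return n ** 4
-- ===== Notes on version B (the rewrite author's own statement) =====
-- stated objective: faster
-- what changed: Replaced four nested counting loops with the closed form max(faces,0)**4.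
import Mathlib
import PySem

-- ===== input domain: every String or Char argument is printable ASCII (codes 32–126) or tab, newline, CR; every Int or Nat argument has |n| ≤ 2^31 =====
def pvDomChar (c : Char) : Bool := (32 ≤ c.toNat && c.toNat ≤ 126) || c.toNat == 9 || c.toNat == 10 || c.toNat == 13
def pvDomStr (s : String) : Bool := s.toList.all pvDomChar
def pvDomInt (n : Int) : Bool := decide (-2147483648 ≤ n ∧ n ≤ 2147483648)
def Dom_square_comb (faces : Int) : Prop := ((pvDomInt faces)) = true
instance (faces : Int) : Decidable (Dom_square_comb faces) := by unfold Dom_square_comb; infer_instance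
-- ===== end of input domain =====

-- B replaces A's four nested counting loops with the closed form max(faces,0)^4 (O(1) vs O(n^4)).

-- ===== PORT A =====
def square_comb (faces : Int) : Int :=
  (PySem.List.pyRange 1 (faces + 1) 1).foldl (fun c _ =>
    (PySem.List.pyRange 1 (faces + 1) 1).foldl (fun c _ =>
      (PySem.List.pyRange 1 (faces + 1) 1).foldl (fun c _ =>
        (PySem.List.pyRange 1 (faces + 1) 1).foldl (fun c _ => c + 1) c) c) c) 0

-- ===== PORT B =====
def square_comb_alt (faces : Int) : Int :=
  (if faces > 0 then faces else 0) ^ 4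

-- ===== PRECONDITION & SPEC =====
def Spec_square_comb (faces : Int) (out : Int) : Prop := out = square_comb_alt faces
instance (faces : Int) (out : Int) : Decidable (Spec_square_comb faces out) := by unfold Spec_square_comb; infer_instance

-- ===== CLAIM (what is proved, stated in full; the proofs are below) =====
def Claim_equal_square_comb : Prop := ∀ (faces : Int), Dom_square_comb faces → Spec_square_comb faces (square_comb faces)

-- ===== LEMMAS AND PROOFS =====
-- a fold that adds the constant k once per element adds k * length in total
theorem pv_foldl_const_add (k : Int) : ∀ (l : List Int) (c : Int),
    l.foldl (fun acc _ => acc + k) c = c + k * l.length := by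
  intro l
  induction l with
  | nil => intro c; simp
  | cons x xs ih => intro c; simp [List.foldl, ih]; ring

theorem square_comb_closed (faces : Int) :
    square_comb faces = ((faces.toNat : Int)) ^ 4 := by
  unfold square_comb
  have hlen : ((PySem.List.pyRange 1 (faces + 1) 1).length : Int) = (faces.toNat : Int) := by
    rw [PySem.List.length_pyRange_one]; congr 1; omega
  have h1 : ∀ c : Int, (PySem.List.pyRange 1 (faces + 1) 1).foldl (fun c _ => c + 1) c
      = c + (faces.toNat : Int) := by
    intro c; rw [pv_foldl_const_add]; rw [hlen]; ring
  simp only [h1]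
  have h2 : ∀ c : Int, (PySem.List.pyRange 1 (faces + 1) 1).foldl
      (fun c _ => c + (faces.toNat : Int)) c = c + (faces.toNat : Int) * (faces.toNat : Int) := by
    intro c; rw [pv_foldl_const_add, hlen]
  simp only [h2]
  have h3 : ∀ c : Int, (PySem.List.pyRange 1 (faces + 1) 1).foldl
      (fun c _ => c + (faces.toNat : Int) * (faces.toNat : Int)) c
      = c + (faces.toNat : Int) * (faces.toNat : Int) * (faces.toNat : Int) := by
    intro c; rw [pv_foldl_const_add, hlen]
  simp only [h3]
  rw [pv_foldl_const_add, hlen]; ring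

-- ===== VERDICT (by name: the statement is the Claim_ definition above) =====
theorem square_comb_spec : Claim_equal_square_comb := by
  intro faces _
  unfold Spec_square_comb square_comb_alt
  rw [square_comb_closed]
  split_ifs with h
  · congr 1; omega
  · have : faces.toNat = 0 := by omega
    simp [this]
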